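-- pv_equiv track=rewrite | github.com/GundalaNikhil/DSA | dsa-problems/Queues/testcases/tc_generators/generate_que008.py | solve
-- ===== SOURCE A (Python) =====
-- import bisect
--
-- def solve(n, k, values):
--     if n == 0 or k == 0:
--         return []
--
--     results = []
--     window = sorted(values[:k])
--
--     #定义获取第二小值的辅助函数
--     def get_second_min():
--         if k == 1:
--             return window[0]
--         return window[1]
--
--     results.append(get_second_min())
--
--     for i in range(k, n):
--         # Remove values[i-k]
--         old_val = values[i-k]
--         idx_to_remove = bisect.bisect_left(window, old_val)
--         window.pop(idx_to_remove)
--         # Add values[i]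
--         bisect.insort(window, values[i])
--         results.append(get_second_min())
--
--     return results
-- ===== SOURCE B (Python) =====
-- def second_min(xs):
--     # one pass, tracking the two smallest values seen so far
--     m1 = m2 = None
--     for x in xs:
--         if m1 is None or x < m1:
--             m1, m2 = x, m1
--         elif m2 is None or x < m2:
--             m2 = x
--     return m2
--
--
-- def solve(n, k, values):
--     if n == 0 or k == 0:
--         return []
--     wins = max(n - k + 1, 1)  # A always reports the initial window
--     if k == 1:
--         return values[:wins]  # a size-1 window's only element is its "second" smallest
--     return [second_min(values[i:i + k]) for i in range(wins)]
-- ===== Notes on version B (the rewrite author's own statement) =====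
-- stated objective: simpler
-- what changed: Replaces the incrementally maintained sorted window (bisect insert/delete per step) with an independent one-pass two-smallest scan of each of the max(n-k+1,1) windows, plus a trivial k==1 fast path.
-- outside the precondition, e.g. on solve(1, -1, [9, 0, 2, 9, 7, 109]): A returns [2, 2, 7], B returns [2, None, None]
import Mathlib
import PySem

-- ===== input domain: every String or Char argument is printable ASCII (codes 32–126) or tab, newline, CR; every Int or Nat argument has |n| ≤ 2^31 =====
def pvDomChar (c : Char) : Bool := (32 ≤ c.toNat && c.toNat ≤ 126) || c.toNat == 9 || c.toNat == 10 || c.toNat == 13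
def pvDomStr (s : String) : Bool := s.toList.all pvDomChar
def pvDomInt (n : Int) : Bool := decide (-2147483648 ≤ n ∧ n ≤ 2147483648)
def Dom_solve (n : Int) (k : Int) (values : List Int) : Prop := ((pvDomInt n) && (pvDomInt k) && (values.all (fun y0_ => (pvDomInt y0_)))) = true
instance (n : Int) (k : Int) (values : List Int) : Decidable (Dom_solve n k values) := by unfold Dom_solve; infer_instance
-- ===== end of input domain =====

-- B replaces A's incrementally maintained sorted window (bisect insert/delete each step)
-- by an independent one-pass two-smallest scan of each window (objective: simpler).

-- ===== PORT A =====
-- get_second_min(): window[0]/window[1]; the defaults are never consulted under Pre_ (window has ≥ min(k,2) elements)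
def pvGetSM (k : Int) (w : List Int) : Int :=
  if k = 1 then PySem.List.pyGetD w 0 0 else PySem.List.pyGetD w 1 0

-- one iteration of A's for-loop over i: pop values[i-k] from the sorted window, insort values[i], append second-min
def pvStepA (k : Int) (values : List Int) (s : List Int × List Int) (i : Int) : List Int × List Int :=
  let old := PySem.List.pyGetD values (i - k) 0
  let idx := PySem.List.bisectLeft s.1 old
  let w1 := ((PySem.List.pop? s.1 (idx : Int)).map Prod.snd).getD []  -- window.pop(idx); none = IndexError, excluded by Pre_
  let v := PySem.List.pyGetD values i 0
  let w2 := PySem.List.insert w1 (PySem.List.bisectRight w1 v : Int) v  -- bisect.insort(window, values[i])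
  (w2, s.2 ++ [pvGetSM k w2])

def solve (n : Int) (k : Int) (values : List Int) : List Int :=
  if n = 0 ∨ k = 0 then []
  else
    let window := PySem.List.sorted (PySem.List.slice values none (some k)) (fun x => x)
    ((PySem.List.pyRange k n 1).foldl (pvStepA k values) (window, [pvGetSM k window])).2

-- ===== PORT B =====
-- 'm1 is None or x < m1' is Option.all; state (m1, m2) = two smallest so far
def pvStep2 (m : Option Int × Option Int) (x : Int) : Option Int × Option Int :=
  if m.1.all (fun v => decide (x < v)) then (some x, m.1)
  else if m.2.all (fun v => decide (x < v)) then (m.1, some x)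
  else m

def pvSecondMin (xs : List Int) : Option Int := (xs.foldl pvStep2 (none, none)).2

def solve_alt (n : Int) (k : Int) (values : List Int) : List Int :=
  if n = 0 ∨ k = 0 then []
  else
    let wins := max (n - k + 1) 1
    if k = 1 then PySem.List.slice values none (some wins)
    else (PySem.List.pyRange 0 wins 1).map
      (fun i => (pvSecondMin (PySem.List.slice values (some i) (some (i + k)))).getD 0)
      -- .getD 0: under Pre_ every window has ≥ 2 elements, so second_min never returns None

-- ===== PRECONDITION & SPEC =====
-- Pre_ admits exactly the inputs on which A returns normally, except negative k: it excludes
-- the inputs where A raises IndexError (n > len(values) with k < n, or a first window of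
-- fewer than two elements) and negative k, where A's occasional returned values come from
-- Python's negative-slice/negative-index accidents (and A raises on most such inputs).
def Pre_solve (n : Int) (k : Int) (values : List Int) : Prop :=
  n = 0 ∨ k = 0 ∨ (1 ≤ k ∧
    ((k < n ∧ n ≤ (values.length : Int)) ∨
     (n ≤ k ∧ ((k = 1 ∧ 1 ≤ (values.length : Int)) ∨ (2 ≤ k ∧ 2 ≤ (values.length : Int))))))
instance (n : Int) (k : Int) (values : List Int) : Decidable (Pre_solve n k values) := by
  unfold Pre_solve; infer_instance

def pvWitness_solve : Int × Int × List Int := (5, 3, [4, 1, 3, 2, 5])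

def Spec_solve (n : Int) (k : Int) (values : List Int) (out : List Int) : Prop := out = solve_alt n k values
instance (n : Int) (k : Int) (values : List Int) (out : List Int) : Decidable (Spec_solve n k values out) := by unfold Spec_solve; infer_instance

-- ===== CLAIM (what is proved, stated in full; the proofs are below) =====
def Claim_equal_solve : Prop := ∀ (n : Int) (k : Int) (values : List Int), Dom_solve n k values → Pre_solve n k values → Spec_solve n k values (solve n k values)

-- ===== LEMMAS AND PROOFS =====

-- proof-side shorthands
def pvS (l : List Int) : List Int := PySem.List.sorted l (fun x => x)
def pvWin (values : List Int) (k' j : Nat) : List Int := (values.drop j).take k'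
def pvPair2 : List Int → Option Int × Option Int
  | [] => (none, none)
  | [a] => (some a, none)
  | a :: b :: _ => (some a, some b)

theorem pvS_perm (l : List Int) : (pvS l).Perm l := by
  simpa [pvS] using PySem.List.sorted_perm l (fun x => x) false

theorem pvS_pairwise (l : List Int) : (pvS l).Pairwise (· ≤ ·) := by
  simpa [pvS] using PySem.List.sorted_pairwise l (fun x => x)

theorem pvS_eq (xs ys : List Int) (hp : ys.Perm xs) (hs : ys.Pairwise (· ≤ ·)) : pvS xs = ys := by
  simpa [pvS] using PySem.List.sorted_id_eq_of_perm_of_pairwise xs ys hp hs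

theorem pv_eraseIdx_eq (w : List Int) (i : Nat) :
    w.eraseIdx i = w.take i ++ w.drop (i + 1) := by
  induction w generalizing i with
  | nil => simp
  | cons a t ih =>
    cases i with
    | zero => simp
    | succ i => simp [List.eraseIdx, ih]

-- pop at bisect_left removes exactly one occurrence of a present value, keeps sortedness
theorem pv_pop_bisectLeft (w : List Int) (hw : w.Pairwise (· ≤ ·)) (x : Int) (hx : x ∈ w) :
    ∃ w1, PySem.List.pop? w ((PySem.List.bisectLeft w x : Nat) : Int) = some (x, w1)
      ∧ w1.Pairwise (· ≤ ·) ∧ (x :: w1).Perm w := by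
  obtain ⟨hle, hlt, hge⟩ := PySem.List.bisectLeft_spec w x hw
  set i := PySem.List.bisectLeft w x with hi
  obtain ⟨j, hj, hjx⟩ := List.mem_iff_getElem.mp hx
  have hij : i ≤ j := by
    by_contra h
    have := hlt j hj (by omega)
    omega
  have hiw : i < w.length := lt_of_le_of_lt hij hj
  have hwi : w[i] = x := by
    have h1 : x ≤ w[i] := hge i hiw le_rfl
    have h2 : w[i] ≤ w[j] := by
      rcases Nat.eq_or_lt_of_le hij with h | h
      · exact le_of_eq (by congr 1)
      · exact (List.pairwise_iff_getElem.mp hw) i j hiw hj h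
    omega
  refine ⟨w.eraseIdx i, ?_, ?_, ?_⟩
  · rw [PySem.List.pop?_natCast w i hiw, hwi]
  · exact List.Pairwise.sublist (List.eraseIdx_sublist w i) hw
  · have hsplit : w.take i ++ w[i] :: w.drop (i + 1) = w := by
      rw [List.getElem_cons_drop]; exact List.take_append_drop i w
    rw [pv_eraseIdx_eq]
    rw [hwi] at hsplit
    have h1 : (w.take i ++ x :: w.drop (i + 1)).Perm (x :: (w.take i ++ w.drop (i + 1))) :=
      List.perm_middle
    rw [hsplit] at h1
    exact h1.symm

-- insort at bisect_right inserts keeping sortedness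
theorem pv_insort (w : List Int) (hw : w.Pairwise (· ≤ ·)) (v : Int) :
    (PySem.List.insert w ((PySem.List.bisectRight w v : Nat) : Int) v).Pairwise (· ≤ ·)
    ∧ (PySem.List.insert w ((PySem.List.bisectRight w v : Nat) : Int) v).Perm (v :: w) := by
  obtain ⟨hle, hlt, hgt⟩ := PySem.List.bisectRight_spec w v hw
  set p := PySem.List.bisectRight w v with hp
  rw [PySem.List.insert_natCast w p v hle]
  constructor
  · rw [List.pairwise_append]
    refine ⟨List.Pairwise.sublist (List.take_sublist p w) hw, ?_, ?_⟩
    · rw [List.pairwise_cons]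
      refine ⟨?_, List.Pairwise.sublist (List.drop_sublist p w) hw⟩
      intro y hy
      obtain ⟨t, ht, rfl⟩ := List.mem_iff_getElem.mp hy
      have hlen : t < (w.drop p).length := ht
      have hplen : p + t < w.length := by simp [List.length_drop] at hlen; omega
      rw [List.getElem_drop]
      exact le_of_lt (hgt (p + t) hplen (by omega))
    · intro a ha b hb
      obtain ⟨s, hs, rfl⟩ := List.mem_iff_getElem.mp ha
      have hsp : s < p := by simp [List.length_take] at hs; omega
      have hsw : s < w.length := by omega
      have h1 : (w.take p)[s] = w[s] := List.getElem_take
      have h2 : w[s] ≤ v := by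
        have := hlt s hsw hsp
        omega
      rcases List.mem_cons.mp hb with rfl | hb'
      · rw [h1]; exact h2
      · obtain ⟨t, ht, rfl⟩ := List.mem_iff_getElem.mp hb'
        have hlen : t < (w.drop p).length := ht
        have hplen : p + t < w.length := by simp [List.length_drop] at hlen; omega
        rw [h1, List.getElem_drop]
        have h3 := hgt (p + t) hplen (by omega)
        omega
  · simpa [List.take_append_drop] using
      (List.perm_middle (a := v) (l₁ := w.take p) (l₂ := w.drop p))

-- sorted(l ++ [x]) is orderedInsert of x into sorted(l)
theorem pvS_append (l : List Int) (x : Int) :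
    pvS (l ++ [x]) = List.orderedInsert (· ≤ ·) x (pvS l) := by
  apply pvS_eq
  · exact (List.perm_orderedInsert _ x _).trans
      (((pvS_perm l).cons x).trans (List.perm_append_singleton x l).symm)
  · exact List.Pairwise.orderedInsert x _ (pvS_pairwise l)

theorem pv_step2_orderedInsert (w : List Int) (hw : w.Pairwise (· ≤ ·)) (x : Int) :
    pvStep2 (pvPair2 w) x = pvPair2 (List.orderedInsert (· ≤ ·) x w) := by
  match w, hw with
  | [], _ => simp [pvStep2, pvPair2, List.orderedInsert]
  | [a], _ =>
    rcases lt_trichotomy x a with h | rfl | h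
    · simp [pvStep2, pvPair2, List.orderedInsert, h, le_of_lt h]
    · simp [pvStep2, pvPair2, List.orderedInsert]
    · simp [pvStep2, pvPair2, List.orderedInsert, not_lt.mpr (le_of_lt h), not_le.mpr h]
  | a :: b :: t, hw =>
    have hab : a ≤ b := (List.pairwise_cons.mp hw).1 b (by simp)
    rcases lt_trichotomy x a with h | rfl | h
    · simp [pvStep2, pvPair2, List.orderedInsert, h, le_of_lt h]
    · rcases eq_or_lt_of_le hab with rfl | h2
      · simp [pvStep2, pvPair2, List.orderedInsert]
      · simp [pvStep2, pvPair2, List.orderedInsert, h2]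
    · rcases lt_trichotomy x b with h2 | rfl | h2
      · simp [pvStep2, pvPair2, List.orderedInsert, not_lt.mpr (le_of_lt h), not_le.mpr h, h2,
          le_of_lt h2]
      · simp [pvStep2, pvPair2, List.orderedInsert, not_lt.mpr (le_of_lt h), not_le.mpr h]
      · simp [pvStep2, pvPair2, List.orderedInsert, not_lt.mpr (le_of_lt h), not_le.mpr h,
          not_lt.mpr (le_of_lt h2), not_le.mpr h2]

-- the two-smallest fold computes the first two elements of sorted(l)
theorem pv_foldTwo (l : List Int) : l.foldl pvStep2 (none, none) = pvPair2 (pvS l) := by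
  induction l using List.reverseRecOn with
  | nil => rfl
  | append_singleton l x ih =>
    rw [List.foldl_append]
    simp only [List.foldl_cons, List.foldl_nil]
    rw [ih, pvS_append, pv_step2_orderedInsert _ (pvS_pairwise l) x]

-- one loop step of A, window = sorted current slice
theorem pv_stepA (k : Int) (values : List Int) (k' : Nat) (hk : k = (k' : Int)) (hk1 : 1 ≤ k')
    (j : Nat) (hjk : j + k' < values.length) (res : List Int) :
    pvStepA k values (pvS (pvWin values k' j), res) (k + j)
      = (pvS (pvWin values k' (j + 1)), res ++ [pvGetSM k (pvS (pvWin values k' (j + 1)))]) := by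
  obtain ⟨k'', rfl⟩ : ∃ k'', k' = k'' + 1 := ⟨k' - 1, by omega⟩
  have hj : j < values.length := by omega
  have hjk' : j + (k'' + 1) < values.length := hjk
  have hdrop : values.drop j = values[j] :: values.drop (j + 1) := (List.getElem_cons_drop hj).symm
  have hwin : pvWin values (k'' + 1) j = values[j] :: (values.drop (j + 1)).take k'' := by
    rw [pvWin, hdrop, List.take_succ_cons]
  have hwin' : pvWin values (k'' + 1) (j + 1)
      = (values.drop (j + 1)).take k'' ++ [values[j + (k'' + 1)]] := by
    rw [pvWin, List.take_add_one, List.getElem?_drop,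
      show j + 1 + k'' = j + (k'' + 1) from by omega,
      List.getElem?_eq_getElem hjk']
    rfl
  have hold : PySem.List.pyGetD values ((k + (j : Int)) - k) 0 = values[j] := by
    rw [show (k + (j : Int)) - k = ((j : Nat) : Int) from by ring,
      PySem.List.pyGetD_eq_getElem values 0 (by positivity) (by exact_mod_cast hj)]
    simp
  have hv : PySem.List.pyGetD values (k + (j : Int)) 0 = values[j + (k'' + 1)] := by
    rw [show k + (j : Int) = ((j + (k'' + 1) : Nat) : Int) from by push_cast [hk]; ring,
      PySem.List.pyGetD_eq_getElem values 0 (by positivity) (by exact_mod_cast hjk')]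
    simp only [Int.toNat_natCast]
  have hmem : values[j] ∈ pvS (pvWin values (k'' + 1) j) := by
    rw [pvS, PySem.List.mem_sorted, hwin]
    exact List.mem_cons_self
  obtain ⟨w1, hpop, hw1s, hw1p⟩ := pv_pop_bisectLeft _ (pvS_pairwise _) _ hmem
  obtain ⟨hs2, hp2⟩ := pv_insort w1 hw1s values[j + (k'' + 1)]
  have hmid : w1.Perm ((values.drop (j + 1)).take k'') := by
    have h1 : (values[j] :: w1).Perm (values[j] :: (values.drop (j + 1)).take k'') :=
      hw1p.trans ((pvS_perm _).trans (by rw [hwin]))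
    exact h1.cons_inv
  have hw2 : pvS (pvWin values (k'' + 1) (j + 1))
      = PySem.List.insert w1
          ((PySem.List.bisectRight w1 values[j + (k'' + 1)] : Nat) : Int) values[j + (k'' + 1)] := by
    apply pvS_eq
    · refine hp2.trans ?_
      refine ((hmid.cons _)).trans ?_
      rw [hwin']
      exact (List.perm_append_singleton _ _).symm
    · exact hs2
  simp only [pvStepA, hold, hv, hpop, Option.map_some, Option.getD_some]
  rw [hw2]

-- A's loop characterised
theorem pv_loopA (k : Int) (values : List Int) (k' : Nat) (hk : k = (k' : Int)) (hk1 : 1 ≤ k')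
    (m : Nat) (hm : (k' + m : Nat) ≤ values.length) (res0 : List Int) :
    (PySem.List.pyRange k (k + m) 1).foldl (pvStepA k values) (pvS (pvWin values k' 0), res0)
      = (pvS (pvWin values k' m),
         res0 ++ (List.range m).map (fun j => pvGetSM k (pvS (pvWin values k' (j + 1))))) := by
  induction m with
  | zero => simp [PySem.List.pyRange_one_eq_nil (le_refl k)]
  | succ m ih =>
    rw [show k + ((m + 1 : Nat) : Int) = (k + (m : Int)) + 1 from by push_cast; ring,
      PySem.List.pyRange_one_succ_right (by omega : k ≤ k + (m : Int)),
      List.foldl_append, ih (by omega)]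
    simp only [List.foldl_cons, List.foldl_nil]
    rw [pv_stepA k values k' hk hk1 m (by omega) _, List.range_succ]
    simp [List.map_append]

theorem solve_eq_map (n k : Int) (values : List Int) (k' : Nat) (hk : k = (k' : Int)) (hk1 : 1 ≤ k')
    (hkn : k ≤ n) (hnl : n ≤ (values.length : Int)) :
    solve n k values
      = (List.range ((n - k).toNat + 1)).map (fun j => pvGetSM k (pvS (pvWin values k' j))) := by
  have hn1 : ¬ (n = 0 ∨ k = 0) := by omega
  have hslice : PySem.List.sorted (PySem.List.slice values none (some k)) (fun x => x)
      = pvS (pvWin values k' 0) := by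
    rw [PySem.List.slice_to values (by omega), pvS, pvWin, List.drop_zero, hk]
    simp
  have hstart : solve n k values
      = ((PySem.List.pyRange k n 1).foldl (pvStepA k values)
          (pvS (pvWin values k' 0), [pvGetSM k (pvS (pvWin values k' 0))])).2 := by
    simp only [solve, if_neg hn1, hslice]
  set m := (n - k).toNat with hm
  have hnm : n = k + (m : Int) := by omega
  rw [hstart, hnm, pv_loopA k values k' hk hk1 m (by omega) _]
  rw [List.range_succ_eq_map]
  simp [List.map_map, Function.comp, Nat.succ_eq_add_one]

-- second_min of a window of length ≥ 2 equals A's window[1]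
theorem pv_secondMin_eq (l : List Int) (hl : 2 ≤ l.length) (k : Int) (hk : k ≠ 1) :
    (pvSecondMin l).getD 0 = pvGetSM k (pvS l) := by
  have hlen : 2 ≤ (pvS l).length := by rw [pvS, PySem.List.length_sorted]; exact hl
  rw [pvSecondMin, pv_foldTwo]
  rcases hS : pvS l with _ | ⟨a, _ | ⟨b, t⟩⟩
  · rw [hS] at hlen; simp at hlen
  · rw [hS] at hlen; simp at hlen
  · simp [pvPair2, pvGetSM, hk, PySem.List.pyGetD, PySem.List.pyGet?, PySem.List.pyIdx?]

-- ===== VERDICT (by name: the statement is the Claim_ definition above) =====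
theorem solve_spec : Claim_equal_solve := by
  intro n k values _hdom hpre
  unfold Spec_solve
  by_cases h0 : n = 0 ∨ k = 0
  · simp only [solve, solve_alt, if_pos h0]
  · have hn0 : ¬ n = 0 := fun h => h0 (Or.inl h)
    have hk0 : ¬ k = 0 := fun h => h0 (Or.inr h)
    have h : 1 ≤ k ∧
        ((k < n ∧ n ≤ (values.length : Int)) ∨
         (n ≤ k ∧ ((k = 1 ∧ 1 ≤ (values.length : Int)) ∨ (2 ≤ k ∧ 2 ≤ (values.length : Int))))) := by
      rcases hpre with h | h | h
      · exact absurd h hn0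
      · exact absurd h hk0
      · exact h
    obtain ⟨hk1, harm⟩ := h
    rcases harm with ⟨hkn', hnl⟩ | ⟨hnk, hrest⟩
    · -- k < n ≤ len(values): the sliding case
      have hkn : k ≤ n := le_of_lt hkn'
      obtain ⟨k', hk⟩ : ∃ k' : Nat, k = (k' : Int) := ⟨k.toNat, by omega⟩
      have hk'1 : 1 ≤ k' := by omega
      rw [solve_eq_map n k values k' hk hk'1 hkn hnl]
      by_cases hkone : k = 1
      · -- k = 1: A returns values[0..n-1], B returns values[:n]
        have hk'1' : k' = 1 := by omega
        have hB : solve_alt n k values = values.take n.toNat := by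
          simp only [solve_alt, if_neg h0, if_pos hkone]
          rw [show max (n - k + 1) 1 = n from by omega]
          exact PySem.List.slice_to values (by omega)
        rw [hB]
        have hone : ∀ (j : Nat) (hjv : j < values.length),
            pvGetSM k (pvS (pvWin values k' j)) = values[j]'hjv := by
          intro j hj
          have hwin : pvWin values k' j = [values[j]] := by
            rw [pvWin, hk'1', ← List.getElem_cons_drop hj]
            rfl
          rw [hwin, pvS_eq [values[j]] [values[j]] (List.Perm.refl _) (List.pairwise_singleton _ _)]
          simp [pvGetSM, hkone, PySem.List.pyGetD, PySem.List.pyGet?, PySem.List.pyIdx?]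
        apply List.ext_getElem
        · simp
          omega
        · intro i h1 h2
          have hi : i < (n - k).toNat + 1 := by simp at h1; omega
          have hiv : i < values.length := by simp at h2; omega
          simp only [List.getElem_map, List.getElem_range, List.getElem_take]
          exact hone i hiv
      · -- k ≥ 2
        have hk2 : 2 ≤ k' := by omega
        simp only [solve_alt, if_neg h0, if_neg hkone]
        rw [show max (n - k + 1) 1 = n - k + 1 from by omega]
        rw [PySem.List.pyRange_one,
          show ((n - k + 1) - 0).toNat = (n - k).toNat + 1 from by omega,
          List.map_map]
        apply List.map_congr_left
        intro j hj
        have hjm : j < (n - k).toNat + 1 := List.mem_range.mp hj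
        have hjk : j + k' ≤ values.length := by omega
        have hslice : PySem.List.slice values (some ((j : Nat) : Int)) (some (((j : Nat) : Int) + k))
            = pvWin values k' j := by
          rw [PySem.List.slice_toNat values (by omega : (0:Int) ≤ (j : Int))
              (by omega : (0:Int) ≤ (j : Int) + k), pvWin, Int.toNat_natCast,
            show ((j : Int) + k).toNat - j = k' from by omega]
        have hlen2 : 2 ≤ (pvWin values k' j).length := by
          simp [pvWin, List.length_take, List.length_drop]
          omega
        simp only [Function.comp_apply, zero_add, hslice]
        exact (pv_secondMin_eq (pvWin values k' j) hlen2 k hkone).symm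
    · -- n ≤ k: A's loop is empty, only the initial window is reported
      have hA : solve n k values = [pvGetSM k (pvS (values.take k.toNat))] := by
        have hsl : PySem.List.sorted (PySem.List.slice values none (some k)) (fun x => x)
            = pvS (values.take k.toNat) := by
          rw [PySem.List.slice_to values (by omega), pvS]
        simp only [solve, if_neg h0, hsl, PySem.List.pyRange_one_eq_nil hnk, List.foldl_nil]
      rw [hA]
      by_cases hkone : k = 1
      · -- the single window has exactly one element
        have hl1 : 1 ≤ values.length := by
          rcases hrest with h | h
          · omega
          · omega
        have htake : values.take 1 = [values[0]'(by omega)] := by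
          rcases values with _ | ⟨a, t⟩
          · simp at hl1
          · rfl
        have hB : solve_alt n k values = values.take 1 := by
          simp only [solve_alt, if_neg h0, if_pos hkone]
          rw [show max (n - k + 1) 1 = (1 : Int) from by omega,
            PySem.List.slice_to values (by omega)]
          rfl
        rw [hB, show k.toNat = 1 from by omega, htake,
          pvS_eq _ _ (List.Perm.refl _) (List.pairwise_singleton _ _)]
        simp [pvGetSM, hkone, PySem.List.pyGetD, PySem.List.pyGet?, PySem.List.pyIdx?]
      · -- the single window has ≥ 2 elements
        have hk2 : 2 ≤ k ∧ 2 ≤ (values.length : Int) := by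
          rcases hrest with h | h
          · omega
          · exact h
        have hB : solve_alt n k values
            = [(pvSecondMin (PySem.List.slice values (some ((0:Nat) : Int))
                (some (((0:Nat) : Int) + k)))).getD 0] := by
          simp only [solve_alt, if_neg h0, if_neg hkone]
          rw [show max (n - k + 1) 1 = (1 : Int) from by omega, PySem.List.pyRange_one]
          norm_num
        have hslice : PySem.List.slice values (some ((0:Nat) : Int)) (some (((0:Nat) : Int) + k))
            = values.take k.toNat := by
          rw [PySem.List.slice_toNat values (by omega : (0:Int) ≤ ((0:Nat) : Int))
              (by omega : (0:Int) ≤ ((0:Nat) : Int) + k)]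
          simp
        have hlen2 : 2 ≤ (values.take k.toNat).length := by
          simp [List.length_take]
          omega
        rw [hB, hslice]
        rw [pv_secondMin_eq (values.take k.toNat) hlen2 k hkone]
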